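-- pv_equiv track=rewrite | github.com/IoanaGabor/University | Semester-1/Fundamentals Of Programming/assignments/a4-913-Gabor-Ioana/backtracking3.py | strictly_increasing_subsequences_iterative
-- ===== SOURCE A (Python) =====
-- def next_element(solution_candidate, numbers):
--     """Generates the next element, given a solution candidate and the numbers list, or returns None
--     if the next element does not exist
--
--     :param solution_candidate: list of integers
--     :param numbers: list of integers
--     :return: integer or None
--     """
--     if len(solution_candidate) == 1:
--         el = solution_candidate[0] + 1
--     elif solution_candidate[-1] == -1:
--         el = solution_candidate[-2] + 1
--     else:
--         el = solution_candidate[-1] + 1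
--     if el >= len(numbers):
--         return None
--     return el
--
-- def is_consistent(solution_candidate, numbers):
--     """Checks if a solution candidate is consistent.
--     A solution candidate is consistent if it has strictly increasing elements.
--
--     :param solution_candidate: list of integers
--     :param numbers: list of integers
--     :return: boolean (true if the solution candidate is consistent)
--     """
--     if len(solution_candidate) == 1:
--         return True
--     if numbers[solution_candidate[-1]] > numbers[solution_candidate[-2]]:
--         return True
--     return False
--
-- def strictly_increasing_subsequences_iterative(numbers):
--     """Genereates the strictly increasing subsequences with iterative backtracking.
--
--     :param numbers: list of integers
--     :return: list of lists of integers
--     """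
--     subsequences = []
--     solution_candidate = [-1]
--     while len(solution_candidate) > 0:
--         el = next_element(solution_candidate, numbers)
--         while el is not None:
--             solution_candidate[-1] = el
--             if is_consistent(solution_candidate, numbers):
--                 subsequences += [[numbers[i] for i in solution_candidate]]
--                 solution_candidate.append(-1)
--                 break
--             el = next_element(solution_candidate, numbers)
--         if el is None:
--             solution_candidate = solution_candidate[:-1]
--
--     return subsequences
-- ===== SOURCE B (Python) =====
-- def strictly_increasing_subsequences_iterative(numbers):
--     """Generates the strictly increasing subsequences (recursive backtracking).
--
--     :param numbers: list of integers
--     :return: list of lists of integers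
--     """
--     result = []
--
--     def extend(prefix, start):
--         for i in range(start, len(numbers)):
--             if not prefix or numbers[i] > prefix[-1]:
--                 candidate = prefix + [numbers[i]]
--                 result.append(candidate)
--                 extend(candidate, i + 1)
--
--     extend([], 0)
--     return result
-- ===== Notes on version B (the rewrite author's own statement) =====
-- stated objective: simpler
-- what changed: Replaced the iterative index-stack backtracking with -1 sentinels and a next_element/is_consistent state machine by a short recursive DFS helper extend(prefix, start) that emits each extension and recurses, producing the identical preorder enumeration.
import Mathlib
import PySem

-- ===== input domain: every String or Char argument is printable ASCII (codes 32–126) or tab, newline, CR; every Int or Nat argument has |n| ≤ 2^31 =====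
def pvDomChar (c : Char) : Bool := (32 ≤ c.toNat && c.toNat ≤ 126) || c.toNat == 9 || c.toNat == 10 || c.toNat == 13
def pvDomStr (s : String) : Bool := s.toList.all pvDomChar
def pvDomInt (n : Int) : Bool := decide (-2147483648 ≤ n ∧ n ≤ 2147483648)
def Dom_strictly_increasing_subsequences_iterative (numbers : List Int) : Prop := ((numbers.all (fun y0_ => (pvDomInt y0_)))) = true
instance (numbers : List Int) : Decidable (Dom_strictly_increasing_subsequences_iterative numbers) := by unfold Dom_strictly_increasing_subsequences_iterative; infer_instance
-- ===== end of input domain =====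

-- B replaces A's iterative sentinel-stack backtracking by a short recursive DFS emitting the same preorder list (objective: simpler).

-- ===== PORT A =====
-- next_element: candidate is nonempty at every call site, so the pyGetD default 0 is never consulted.
def next_element (solution_candidate : List Int) (numbers : List Int) : Option Int :=
  let el : Int :=
    if solution_candidate.length == 1 then
      PySem.List.pyGetD solution_candidate 0 0 + 1
    else if PySem.List.pyGetD solution_candidate (-1) 0 == -1 then
      PySem.List.pyGetD solution_candidate (-2) 0 + 1
    else
      PySem.List.pyGetD solution_candidate (-1) 0 + 1
  if el ≥ (numbers.length : Int) then none else some el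

-- is_consistent: indices looked up are always in range at call sites, so the pyGetD default 0 is never consulted.
def is_consistent (solution_candidate : List Int) (numbers : List Int) : Bool :=
  if solution_candidate.length == 1 then true
  else if PySem.List.pyGetD numbers (PySem.List.pyGetD solution_candidate (-1) 0) 0 >
          PySem.List.pyGetD numbers (PySem.List.pyGetD solution_candidate (-2) 0) 0 then true
  else false

-- The while/inner-while pair of A: each iteration computes next_element of the current candidate
-- (exactly what both the outer loop entry and the inner loop's retry do), then either pops (el is None),
-- emits and pushes -1 (consistent), or keeps scanning with the updated last element (inconsistent).
-- fuel only makes the recursion structurally total; fuel sufficiency is proved below.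
def siLoop : Nat → List Int → List (List Int) → List Int → List (List Int)
  | 0, _, subsequences, _ => subsequences
  | fuel+1, numbers, subsequences, solution_candidate =>
    if solution_candidate.length = 0 then subsequences
    else
      match next_element solution_candidate numbers with
      | none => siLoop fuel numbers subsequences solution_candidate.dropLast
      | some el =>
        let cand := solution_candidate.dropLast ++ [el]
        if is_consistent cand numbers then
          siLoop fuel numbers
            (subsequences ++ [cand.map (fun i => PySem.List.pyGetD numbers i 0)])
            (cand ++ [-1])
        else
          siLoop fuel numbers subsequences cand

def strictly_increasing_subsequences_iterative (numbers : List Int) : List (List Int) :=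
  siLoop ((numbers.length + 2) ^ (numbers.length + 2)) numbers [] [-1]

-- ===== PORT B =====
-- extend(prefix, start): for i in range(start, len(numbers)): if not prefix or numbers[i] > prefix[-1]:
--   emit prefix+[numbers[i]], recurse at i+1; returns the emitted list instead of mutating a closure variable.
def extendB (numbers : List Int) (pref : List Int) (start : Nat) : List (List Int) :=
  if h : start < numbers.length then
    (if pref = [] ∨ PySem.List.pyGetD pref (-1) 0 < numbers[start] then
      (pref ++ [numbers[start]]) :: extendB numbers (pref ++ [numbers[start]]) (start + 1)
     else []) ++ extendB numbers pref (start + 1)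
  else []
termination_by numbers.length - start

def strictly_increasing_subsequences_iterative_alt (numbers : List Int) : List (List Int) :=
  extendB numbers [] 0

-- ===== PRECONDITION & SPEC =====
def Spec_strictly_increasing_subsequences_iterative (numbers : List Int) (out : List (List Int)) : Prop := out = strictly_increasing_subsequences_iterative_alt numbers
instance (numbers : List Int) (out : List (List Int)) : Decidable (Spec_strictly_increasing_subsequences_iterative numbers out) := by unfold Spec_strictly_increasing_subsequences_iterative; infer_instance

-- ===== CLAIM (what is proved, stated in full; the proofs are below) =====
def Claim_equal_strictly_increasing_subsequences_iterative : Prop := ∀ (numbers : List Int), Dom_strictly_increasing_subsequences_iterative numbers → Spec_strictly_increasing_subsequences_iterative numbers (strictly_increasing_subsequences_iterative numbers)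

-- ===== LEMMAS AND PROOFS =====

-- xs[-2] on a list ending in two known elements
lemma pyGetD_neg_two_append (l : List Int) (a b : Int) :
    PySem.List.pyGetD (l ++ [a, b]) (-2) 0 = a := by
  rw [PySem.List.pyGetD_neg_ofNat (l ++ [a, b]) 2 0 (by omega) (by simp)]
  simp

-- one unfolding of the loop body
lemma siLoop_succ (nums : List Int) (F : Nat) (acc : List (List Int)) (cand : List Int) :
    siLoop (F + 1) nums acc cand =
      (if cand.length = 0 then acc
       else
         match next_element cand nums with
         | none => siLoop F nums acc cand.dropLast
         | some el =>
           let c := cand.dropLast ++ [el]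
           if is_consistent c nums then
             siLoop F nums (acc ++ [c.map (fun i => PySem.List.pyGetD nums i 0)]) (c ++ [-1])
           else siLoop F nums acc c) := rfl

lemma siLoop_nil (nums : List Int) (f : Nat) (acc : List (List Int)) :
    siLoop f nums acc [] = acc := by
  cases f <;> simp [siLoop]

-- next_element on a candidate whose last entry is a (nonnegative) index s: el = s + 1
lemma ne_last (nums ip : List Int) (s : Nat) :
    next_element (ip ++ [(s : Int)]) nums =
      (if ((s : Int) + 1) ≥ (nums.length : Int) then none else some ((s : Int) + 1)) := by
  rcases List.eq_nil_or_concat ip with h | ⟨l, a, rfl⟩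
  · subst h; simp [next_element]
  · have h1 : PySem.List.pyGetD (l ++ [a, (s : Int)]) (-1) 0 = (s : Int) := by
      have := PySem.List.pyGetD_neg_one_append_singleton (l ++ [a]) ((s : Int)) 0
      simpa using this
    simp [next_element, h1, show ((s : Int)) ≠ -1 by omega]

-- next_element right after pushing the -1 sentinel on top of the prefix ip ++ [s]
lemma ne_push (nums ip : List Int) (s : Nat) :
    next_element ((ip ++ [(s : Int)]) ++ [(-1 : Int)]) nums =
      (if ((s : Int) + 1) ≥ (nums.length : Int) then none else some ((s : Int) + 1)) := by
  have h1 : PySem.List.pyGetD (ip ++ [(s : Int), -1]) (-1) 0 = -1 := by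
    have := PySem.List.pyGetD_neg_one_append_singleton (ip ++ [(s : Int)]) (-1 : Int) 0
    simpa using this
  have h2 : PySem.List.pyGetD (ip ++ [(s : Int), -1]) (-2) 0 = (s : Int) :=
    pyGetD_neg_two_append ip _ _
  simp [next_element, h1, h2]

-- next_element at the initial state [-1]
lemma ne_init (nums : List Int) :
    next_element (([] : List Int) ++ [(-1 : Int)]) nums =
      (if (((0 : Nat) : Int)) ≥ (nums.length : Int) then none else some ((0 : Nat) : Int)) := by
  simp [next_element]

-- is_consistent on ip ++ [s] says exactly what extendB's guard says on the value prefix of ip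
lemma cons_cond (nums ip : List Int) (s : Nat) (hs : s < nums.length) :
    (is_consistent (ip ++ [(s : Int)]) nums = true) ↔
      (ip.map (fun i => PySem.List.pyGetD nums i 0) = [] ∨
       PySem.List.pyGetD (ip.map (fun i => PySem.List.pyGetD nums i 0)) (-1) 0 < nums[s]) := by
  have h4 : PySem.List.pyGetD nums ((s : Int)) 0 = nums[s] := by
    rw [PySem.List.pyGetD_natCast]; exact List.getD_eq_getElem nums 0 hs
  rcases List.eq_nil_or_concat ip with h | ⟨l, a, rfl⟩
  · subst h; simp [is_consistent]
  · have h1 : PySem.List.pyGetD (l ++ [a, (s : Int)]) (-1) 0 = (s : Int) := by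
      have := PySem.List.pyGetD_neg_one_append_singleton (l ++ [a]) ((s : Int)) 0
      simpa using this
    have h2 : PySem.List.pyGetD (l ++ [a, (s : Int)]) (-2) 0 = a :=
      pyGetD_neg_two_append l _ _
    have h3 : PySem.List.pyGetD (l.map (fun i => PySem.List.pyGetD nums i 0) ++
        [PySem.List.pyGetD nums a 0]) (-1) 0 = PySem.List.pyGetD nums a 0 :=
      PySem.List.pyGetD_neg_one_append_singleton _ _ _
    simp [is_consistent, h1, h2, h3, h4]

-- the value emitted by A at index s equals the candidate extendB emits
lemma map_concat_val (nums ip : List Int) (s : Nat) (hs : s < nums.length) :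
    (ip ++ [(s : Int)]).map (fun i => PySem.List.pyGetD nums i 0) =
      ip.map (fun i => PySem.List.pyGetD nums i 0) ++ [nums[s]] := by
  have h4 : PySem.List.pyGetD nums ((s : Int)) 0 = nums[s] := by
    rw [PySem.List.pyGetD_natCast]; exact List.getD_eq_getElem nums 0 hs
  simp [h4]

-- the scan is over: extendB emits nothing from s ≥ n
lemma extendB_stop (nums pref : List Int) (s : Nat) (hs : nums.length ≤ s) :
    extendB nums pref s = [] := by
  rw [extendB]; rw [dif_neg (by omega)]

-- pop step: from state ip ++ [x] with next index s ≥ n, one step returns to ip and emits nothing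
lemma siLoop_pop (nums ip : List Int) (x : Int) (s : Nat) (hs : nums.length ≤ s)
    (hel : next_element (ip ++ [x]) nums =
      (if ((s : Int)) ≥ (nums.length : Int) then none else some ((s : Int))))
    (f : Nat) (acc : List (List Int)) :
    siLoop (f + 1) nums acc (ip ++ [x]) =
      siLoop f nums (acc ++ extendB nums (ip.map (fun i => PySem.List.pyGetD nums i 0)) s) ip := by
  have hne : next_element (ip ++ [x]) nums = none := by
    rw [hel, if_pos (by exact_mod_cast hs)]
  rw [siLoop_succ, if_neg (by simp), hne, List.dropLast_concat,
    extendB_stop nums _ s hs, List.append_nil]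

-- The central correspondence: from state ip ++ [x] whose next candidate index is s, the loop
-- (given exactly u more fuel, u bounded by (n+2)^(k+1)) appends extendB on the value prefix of ip
-- starting at s, and returns to state ip.
lemma siLoop_scan (nums : List Int) :
    ∀ k : Nat, ∀ (ip : List Int) (x : Int) (s : Nat),
      nums.length - s ≤ k →
      next_element (ip ++ [x]) nums =
        (if ((s : Int)) ≥ (nums.length : Int) then none else some ((s : Int))) →
      ∃ u : Nat, u ≤ (nums.length + 2) ^ (k + 1) ∧
        ∀ (f : Nat) (acc : List (List Int)),
          siLoop (f + u) nums acc (ip ++ [x]) =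
          siLoop f nums (acc ++ extendB nums (ip.map (fun i => PySem.List.pyGetD nums i 0)) s) ip := by
  intro k
  induction k with
  | zero =>
    intro ip x s hk hel
    exact ⟨1, Nat.one_le_pow _ _ (by omega),
      fun f acc => siLoop_pop nums ip x s (by omega) hel f acc⟩
  | succ k IH =>
    intro ip x s hk hel
    by_cases hsn : s < nums.length
    · -- the next index is in range: one element is tried
      have hA1 : 1 ≤ (nums.length + 2) ^ (k + 1) := Nat.one_le_pow _ _ (by omega)
      have hpow : (nums.length + 2) ^ (k + 1 + 1) = (nums.length + 2) ^ (k + 1) * (nums.length + 2) :=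
        pow_succ _ _
      have hne : next_element (ip ++ [x]) nums = some ((s : Int)) := by
        rw [hel, if_neg (by omega)]
      have hel2 : next_element (ip ++ [(s : Int)]) nums =
          (if (((s + 1 : Nat) : Int)) ≥ (nums.length : Int) then none
           else some (((s + 1 : Nat) : Int))) := by
        have := ne_last nums ip s; push_cast; push_cast at this; exact this
      obtain ⟨u2, hu2, hrun2⟩ := IH ip ((s : Int)) (s + 1) (by omega) hel2
      by_cases hcons : is_consistent (ip ++ [(s : Int)]) nums = true
      · -- consistent: emit, push the sentinel, recurse, pop back, continue the scan
        have hel1 : next_element ((ip ++ [(s : Int)]) ++ [(-1 : Int)]) nums =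
            (if (((s + 1 : Nat) : Int)) ≥ (nums.length : Int) then none
             else some (((s + 1 : Nat) : Int))) := by
          have := ne_push nums ip s; push_cast; push_cast at this; exact this
        obtain ⟨u1, hu1, hrun1⟩ := IH (ip ++ [(s : Int)]) (-1) (s + 1) (by omega) hel1
        refine ⟨1 + u1 + u2, by nlinarith, ?_⟩
        intro f acc
        have e1 : f + (1 + u1 + u2) = ((f + u2) + u1) + 1 := by omega
        rw [e1, siLoop_succ, if_neg (by simp), hne]
        simp only [List.dropLast_concat]
        rw [if_pos hcons, hrun1, hrun2]
        congr 1
        conv_rhs => rw [extendB]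
        rw [dif_pos hsn, if_pos ((cons_cond nums ip s hsn).mp hcons),
          map_concat_val nums ip s hsn]
        simp
      · -- inconsistent: the tried element is skipped, the scan moves to s+1
        refine ⟨u2 + 1, by nlinarith, ?_⟩
        intro f acc
        have e1 : f + (u2 + 1) = (f + u2) + 1 := by omega
        rw [e1, siLoop_succ, if_neg (by simp), hne]
        simp only [List.dropLast_concat]
        rw [if_neg hcons, hrun2]
        congr 1
        conv_rhs => rw [extendB]
        rw [dif_pos hsn,
          if_neg (fun hc => hcons ((cons_cond nums ip s hsn).mpr hc))]
        simp
    · exact ⟨1, Nat.one_le_pow _ _ (by omega),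
        fun f acc => siLoop_pop nums ip x s (by omega) hel f acc⟩

-- ===== VERDICT (by name: the statement is the Claim_ definition above) =====
theorem strictly_increasing_subsequences_iterative_spec : Claim_equal_strictly_increasing_subsequences_iterative := by
  intro numbers _hdom
  unfold Spec_strictly_increasing_subsequences_iterative
  obtain ⟨u, hu, hrun⟩ := siLoop_scan numbers numbers.length [] (-1) 0 (by omega) (ne_init numbers)
  have hle : u ≤ (numbers.length + 2) ^ (numbers.length + 2) :=
    le_trans hu (Nat.pow_le_pow_right (by omega) (by omega))
  have hfin := hrun ((numbers.length + 2) ^ (numbers.length + 2) - u) []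
  rw [Nat.sub_add_cancel hle] at hfin
  unfold strictly_increasing_subsequences_iterative strictly_increasing_subsequences_iterative_alt
  simpa [siLoop_nil] using hfin
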